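-- pv_equiv track=rewrite | github.com/ynput/ayon-core | server_addon/traypublisher/client/ayon_traypublisher/plugins/publish/extract_editorial_pckg.py | _split_ffmpeg_args
-- ===== SOURCE A (Python) =====
-- def _split_ffmpeg_args(in_args):
--     """Makes sure all entered arguments are separated in individual items.
--
--     Split each argument string with " -" to identify if string contains
--     one or more arguments.
--     """
--     splitted_args = []
--     for arg in in_args:
--         sub_args = arg.split(" -")
--         if len(sub_args) == 1:
--             if arg and arg not in splitted_args:
--                 splitted_args.append(arg)
--             continue
--
--         for idx, arg in enumerate(sub_args):
--             if idx != 0: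
--                 arg = "-" + arg
--
--             if arg and arg not in splitted_args:
--                 splitted_args.append(arg)
--     return splitted_args
-- ===== SOURCE B (Python) =====
-- def _split_ffmpeg_args(in_args):
--     # Character-level scanner: walk each string once, flushing a piece whenever
--     # the two-char separator " -" is seen (the new piece starts with the "-"),
--     # then order-preserving dedup of the non-empty pieces via dict.fromkeys.
--     pieces = []
--     for arg in in_args:
--         cur = []
--         k = 0
--         n = len(arg)
--         while k < n:
--             if arg[k] == " " and k + 1 < n and arg[k + 1] == "-":
--                 pieces.append("".join(cur))
--                 cur = ["-"]
--                 k += 2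
--             else:
--                 cur.append(arg[k])
--                 k += 1
--         pieces.append("".join(cur))
--     return list(dict.fromkeys(p for p in pieces if p))
-- ===== Notes on version B (the rewrite author's own statement) =====
-- stated objective: faster
-- what changed: B replaces A's per-argument split(' -')/enumerate/re-prefix loop with a single character-level scanner that emits dash-keeping pieces directly, and replaces A's 'not in result' linear scan per piece with one dict.fromkeys dedup pass over the non-empty pieces, removing the quadratic membership scan.
import Mathlib
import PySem

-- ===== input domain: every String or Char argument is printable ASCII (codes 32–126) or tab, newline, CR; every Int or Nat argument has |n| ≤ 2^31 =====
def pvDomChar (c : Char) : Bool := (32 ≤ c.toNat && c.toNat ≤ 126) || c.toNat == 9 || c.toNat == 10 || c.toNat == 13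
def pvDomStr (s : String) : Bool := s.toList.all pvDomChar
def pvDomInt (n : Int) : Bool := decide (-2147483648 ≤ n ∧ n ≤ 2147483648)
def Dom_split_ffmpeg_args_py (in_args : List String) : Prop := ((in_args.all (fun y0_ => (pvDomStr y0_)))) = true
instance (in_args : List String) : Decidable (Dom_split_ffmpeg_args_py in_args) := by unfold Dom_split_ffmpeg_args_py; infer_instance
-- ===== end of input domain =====

-- B (measured faster): a character-level scanner flushes dash-keeping pieces directly, then one
-- dict.fromkeys dedup pass over the non-empty pieces replaces A's linear 'not in result' scan.

-- ===== PORT A =====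
def split_ffmpeg_args_py (in_args : List String) : List String :=
  in_args.foldl
    (fun splitted_args arg =>
      -- sep " -" is non-empty, so split? never raises; getD only makes the call total
      let sub_args := (PySem.Str.split? arg " -").getD []
      if sub_args.length = 1 then
        if arg ≠ "" ∧ arg ∉ splitted_args then splitted_args ++ [arg] else splitted_args
      else
        (PySem.List.enumerate sub_args).foldl
          (fun acc p =>
            let a := if p.1 ≠ 0 then "-" ++ p.2 else p.2
            if a ≠ "" ∧ a ∉ acc then acc ++ [a] else acc)
          splitted_args)
    []

-- ===== PORT B =====
-- the inner while-loop of B: walk the characters, flush the current piece at every " -",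
-- the new piece starting with the kept "-" ("".join(cur) is String.ofList on a char list)
def pvScan (l cur : List Char) : List String :=
  match l with
  | [] => [String.ofList cur]
  | c :: rest =>
      if c = ' ' ∧ 1 ≤ rest.length ∧ rest.headD ' ' = '-' then
        String.ofList cur :: pvScan (rest.drop 1) ['-']
      else pvScan rest (cur ++ [c])
  termination_by l.length
  decreasing_by all_goals simp

def split_ffmpeg_args_py_alt (in_args : List String) : List String :=
  let pieces := in_args.foldl (fun acc arg => acc ++ pvScan arg.toList []) []
  -- list(dict.fromkeys(...)) is PySem.List.dedup
  PySem.List.dedup (pieces.filter (fun p => p ≠ ""))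

-- ===== PRECONDITION & SPEC =====
def Spec_split_ffmpeg_args_py (in_args : List String) (out : List String) : Prop := out = split_ffmpeg_args_py_alt in_args
instance (in_args : List String) (out : List String) : Decidable (Spec_split_ffmpeg_args_py in_args out) := by unfold Spec_split_ffmpeg_args_py; infer_instance

-- ===== CLAIM (what is proved, stated in full; the proofs are below) =====
def Claim_equal_split_ffmpeg_args_py : Prop := ∀ (in_args : List String), Dom_split_ffmpeg_args_py in_args → Spec_split_ffmpeg_args_py in_args (split_ffmpeg_args_py in_args)

-- ===== LEMMAS AND PROOFS =====

-- the "append if non-empty and new" step both programs effectively perform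
def pvF (acc : List String) (a : String) : List String :=
  if a ≠ "" ∧ a ∉ acc then acc ++ [a] else acc

-- A's per-argument piece list: head of the split unchanged, later pieces "-"-prefixed
def pvPieces (arg : String) : List String :=
  match (PySem.Str.split? arg " -").getD [] with
  | [] => []
  | p :: rest => p :: rest.map (fun q => "-" ++ q)

-- splitOn.go always returns at least accl.length + 1 pieces, and exactly that many
-- only when the separator was never found, in which case the single new piece is all the input
theorem pv_go_spec (sep : List Char) :
    ∀ (fuel : Nat) (l cur : List Char) (accl : List (List Char)),
      accl.length + 1 ≤ (PySem.Chars.splitOn.go sep fuel l cur accl).length ∧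
      ((PySem.Chars.splitOn.go sep fuel l cur accl).length = accl.length + 1 →
        PySem.Chars.splitOn.go sep fuel l cur accl = accl.reverse ++ [cur.reverse ++ l]) := by
  intro fuel
  induction fuel with
  | zero => intro l cur accl; simp [PySem.Chars.splitOn.go]
  | succ n ih =>
    intro l cur accl
    cases l with
    | nil => simp [PySem.Chars.splitOn.go]
    | cons c rest =>
      by_cases hp : sep.isPrefixOf (c :: rest) = true
      · obtain ⟨h1, -⟩ := ih (List.drop sep.length (c :: rest)) [] (cur.reverse :: accl)
        simp only [List.length_cons] at h1
        simp only [PySem.Chars.splitOn.go, hp, if_true]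
        exact ⟨by omega, fun hl => absurd hl (by omega)⟩
      · obtain ⟨h1, h2⟩ := ih rest (c :: cur) accl
        simp only [PySem.Chars.splitOn.go, hp, Bool.false_eq_true, if_false]
        refine ⟨h1, fun hl => ?_⟩
        rw [h2 hl]
        simp

theorem pv_splitOn_ne_nil (s sep : List Char) : PySem.Chars.splitOn s sep ≠ [] := by
  have h := (pv_go_spec sep (s.length + 1) s [] []).1
  intro hc
  unfold PySem.Chars.splitOn at hc
  rw [hc] at h; simp at h

theorem pv_go_ne_nil (sep : List Char) (fuel : Nat) (l cur : List Char) :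
    PySem.Chars.splitOn.go sep fuel l cur [] ≠ [] := by
  have h := (pv_go_spec sep fuel l cur []).1
  intro hc
  rw [hc] at h; simp at h

theorem pv_splitOn_len_one (s sep : List Char)
    (h : (PySem.Chars.splitOn s sep).length = 1) : PySem.Chars.splitOn s sep = [s] := by
  have h2 := (pv_go_spec sep (s.length + 1) s [] []).2
  unfold PySem.Chars.splitOn at *
  simpa using h2 (by simpa using h)

theorem pv_sub_eq (arg : String) :
    (PySem.Str.split? arg " -").getD []
      = (PySem.Chars.splitOn arg.toList [' ', '-']).map String.ofList := by
  simp [PySem.Str.split?, PySem.Chars.split?]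

-- the enumerate-tail of A's inner loop is the "-"-prefixed map folded with pvF
theorem pv_enum_fold (rest : List String) :
    ∀ (s : Int) (acc : List String), 0 < s →
      (PySem.List.enumerate rest s).foldl
          (fun acc p =>
            if (if p.1 ≠ 0 then "-" ++ p.2 else p.2) ≠ "" ∧
                (if p.1 ≠ 0 then "-" ++ p.2 else p.2) ∉ acc then
              acc ++ [if p.1 ≠ 0 then "-" ++ p.2 else p.2]
            else acc) acc
        = (rest.map (fun q => "-" ++ q)).foldl pvF acc := by
  induction rest with
  | nil => intro s acc _; simp [PySem.List.enumerate_nil]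
  | cons x xs ih =>
    intro s acc hs
    rw [PySem.List.enumerate_cons]
    simp only [List.map_cons, List.foldl_cons]
    have hns : s ≠ 0 := by omega
    rw [ih (s + 1) _ (by omega)]
    simp [hns, pvF]

-- A's per-argument body is exactly a pvF-fold over pvPieces arg
theorem pv_stepA_eq (splitted_args : List String) (arg : String) :
    (let sub_args := (PySem.Str.split? arg " -").getD []
     if sub_args.length = 1 then
       if arg ≠ "" ∧ arg ∉ splitted_args then splitted_args ++ [arg] else splitted_args
     else
       (PySem.List.enumerate sub_args).foldl
         (fun acc p =>
           let a := if p.1 ≠ 0 then "-" ++ p.2 else p.2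
           if a ≠ "" ∧ a ∉ acc then acc ++ [a] else acc)
         splitted_args)
      = (pvPieces arg).foldl pvF splitted_args := by
  simp only [pvPieces, pv_sub_eq]
  by_cases h1 : ((PySem.Chars.splitOn arg.toList [' ', '-']).map String.ofList).length = 1
  · have hs : PySem.Chars.splitOn arg.toList [' ', '-'] = [arg.toList] :=
      pv_splitOn_len_one _ _ (by simpa using h1)
    rw [hs]
    simp [pvF]
  · rw [if_neg h1]
    cases hs : PySem.Chars.splitOn arg.toList [' ', '-'] with
    | nil => exact absurd hs (pv_splitOn_ne_nil _ _)
    | cons p ps =>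
      simp only [List.map_cons, PySem.List.enumerate_cons, List.foldl_cons]
      rw [pv_enum_fold (List.map String.ofList ps) (0 + 1) _ (by omega)]
      simp [pvF]

-- B's scan condition is exactly " -"-prefix detection
theorem pv_cond_iff (c : Char) (rest : List Char) :
    (c = ' ' ∧ 1 ≤ rest.length ∧ rest.headD ' ' = '-')
      ↔ ([' ', '-'].isPrefixOf (c :: rest) = true) := by
  cases rest with
  | nil => simp [List.isPrefixOf]
  | cons r rs =>
    simp only [List.isPrefixOf, Bool.and_eq_true, beq_iff_eq, List.headD_cons, List.length_cons]
    constructor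
    · rintro ⟨h1, -, h3⟩; exact ⟨h1.symm, h3.symm, trivial⟩
    · rintro ⟨h1, h2, -⟩; exact ⟨h1.symm, by omega, h2.symm⟩

-- go shifts its accumulator out front
theorem pv_go_shift (sep : List Char) :
    ∀ (fuel : Nat) (l cur : List Char) (accl : List (List Char)),
      PySem.Chars.splitOn.go sep fuel l cur accl
        = accl.reverse ++ PySem.Chars.splitOn.go sep fuel l cur [] := by
  intro fuel
  induction fuel with
  | zero => intro l cur accl; simp [PySem.Chars.splitOn.go]
  | succ n ih =>
    intro l cur accl
    cases l with
    | nil => simp [PySem.Chars.splitOn.go]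
    | cons c rest =>
      by_cases hp : sep.isPrefixOf (c :: rest) = true
      · simp only [PySem.Chars.splitOn.go, hp, if_true]
        rw [ih _ _ (cur.reverse :: accl), ih _ _ ([cur.reverse])]
        simp
      · simp only [PySem.Chars.splitOn.go, hp, Bool.false_eq_true, if_false]
        exact ih rest (c :: cur) accl

-- the scanner computes the splitOn pieces, first one carrying the pending prefix,
-- later ones re-prefixed with '-'
theorem pv_scan_go :
    ∀ (fuel : Nat) (l pre cur : List Char), l.length < fuel →
      pvScan l (pre ++ cur.reverse)
        = (match PySem.Chars.splitOn.go [' ', '-'] fuel l cur [] with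
           | [] => []
           | p :: ps => String.ofList (pre ++ p) :: ps.map (fun q => String.ofList ('-' :: q))) := by
  intro fuel
  induction fuel with
  | zero => intro l pre cur h; omega
  | succ n ih =>
    intro l pre cur h
    cases l with
    | nil => simp [pvScan, PySem.Chars.splitOn.go]
    | cons c rest =>
      by_cases hc : c = ' ' ∧ 1 ≤ rest.length ∧ rest.headD ' ' = '-'
      · have hp : [' ', '-'].isPrefixOf (c :: rest) = true := (pv_cond_iff c rest).mp hc
        have hgo : PySem.Chars.splitOn.go [' ', '-'] (n + 1) (c :: rest) cur []
            = cur.reverse :: PySem.Chars.splitOn.go [' ', '-'] n (rest.drop 1) [] [] := by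
          simp only [PySem.Chars.splitOn.go, hp, if_true]
          rw [pv_go_shift]
          simp [List.drop_succ_cons]
        rw [hgo]
        simp only [pvScan]
        rw [if_pos hc]
        cases hg : PySem.Chars.splitOn.go [' ', '-'] n (rest.drop 1) [] [] with
        | nil => exact absurd hg (pv_go_ne_nil _ _ _ _)
        | cons q qs =>
          have hih := ih (rest.drop 1) ['-'] [] (by simp at h ⊢; omega)
          rw [hg] at hih
          simp only [List.reverse_nil, List.append_nil] at hih
          rw [hih]
          simp
      · have hp : [' ', '-'].isPrefixOf (c :: rest) = false := by
          rw [Bool.eq_false_iff]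
          exact fun h' => hc ((pv_cond_iff c rest).mpr h')
        have hgo : PySem.Chars.splitOn.go [' ', '-'] (n + 1) (c :: rest) cur []
            = PySem.Chars.splitOn.go [' ', '-'] n rest (c :: cur) [] := by
          simp only [PySem.Chars.splitOn.go, hp, Bool.false_eq_true, if_false]
        rw [hgo]
        simp only [pvScan]
        rw [if_neg hc]
        have hacc : pre ++ cur.reverse ++ [c] = pre ++ (c :: cur).reverse := by simp
        rw [hacc]
        exact ih rest pre (c :: cur) (by simp at h ⊢; omega)

-- per argument, the scanner produces exactly A's piece list
theorem pv_scan_pieces (arg : String) : pvScan arg.toList [] = pvPieces arg := by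
  have h := pv_scan_go (arg.toList.length + 1) arg.toList [] [] (by omega)
  simp only [List.reverse_nil, List.append_nil] at h
  rw [h]
  unfold pvPieces
  rw [pv_sub_eq]
  have hgo : PySem.Chars.splitOn.go [' ', '-'] (arg.toList.length + 1) arg.toList [] []
      = PySem.Chars.splitOn arg.toList [' ', '-'] := rfl
  rw [hgo]
  cases hs : PySem.Chars.splitOn arg.toList [' ', '-'] with
  | nil => exact absurd hs (pv_splitOn_ne_nil _ _)
  | cons p ps =>
    simp only [List.nil_append, List.map_cons]
    congr 1
    rw [List.map_map]
    apply List.map_congr_left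
    intro q _
    apply String.toList_injective
    simp

-- B's dedup of the non-empty pieces is the pvF-fold
theorem pv_dedup_fold (l : List String) :
    ∀ (acc : List String),
      (l.filter (fun p => p ≠ "")).foldl PySem.Set.add acc = l.foldl pvF acc := by
  induction l with
  | nil => intro acc; simp
  | cons x xs ih =>
    intro acc
    by_cases hx : x = ""
    · subst hx
      have h1 : pvF acc "" = acc := by simp [pvF]
      simp only [List.filter_cons, List.foldl_cons, h1]
      simpa using ih acc
    · have h2 : PySem.Set.add acc x = pvF acc x := by
        simp only [PySem.Set.add, pvF, hx, ne_eq, not_false_eq_true, true_and]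
        by_cases hm : x ∈ acc <;> simp [hm]
      simp only [List.filter_cons]
      rw [if_pos (by simp [hx]), List.foldl_cons, List.foldl_cons, h2, ih]

-- ===== VERDICT (by name: the statement is the Claim_ definition above) =====
theorem split_ffmpeg_args_py_spec : Claim_equal_split_ffmpeg_args_py := by
  intro in_args _
  unfold Spec_split_ffmpeg_args_py split_ffmpeg_args_py split_ffmpeg_args_py_alt
  simp only [pv_stepA_eq]
  have hpieces :
      in_args.foldl (fun acc arg => acc ++ pvScan arg.toList []) []
        = in_args.flatMap (fun arg => pvScan arg.toList []) := by
    simpa using PySem.List.foldl_append_eq_flatMap (fun arg => pvScan arg.toList [])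
      (l := in_args) (acc := [])
  rw [hpieces]
  have hscan : in_args.flatMap (fun arg => pvScan arg.toList []) = in_args.flatMap pvPieces := by
    apply List.flatMap_congr
    intro a _
    exact pv_scan_pieces a
  rw [hscan]
  rw [PySem.List.dedup_eq_ofList]
  show _ = List.foldl PySem.Set.add PySem.Set.empty _
  rw [pv_dedup_fold]
  rw [List.flatMap_def, List.foldl_flatten, List.foldl_map]
  rfl
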